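-- pv_equiv track=rewrite | github.com/skanev/playground | other/clrs/14/problems/09.py | break_string
-- ===== SOURCE A (Python) =====
-- import math
--
-- def break_string(breaks, n):
--     breaks = (0, *sorted(breaks), n)
--     best = [[0] * len(breaks) for _ in range(len(breaks))]
--
--     for width in range(2, len(breaks)):
--         for i in range(len(breaks) - width):
--             j, q = i + width, math.inf
--             for k in range(i + 1, j):
--                 q = min(q, best[i][k] + best[k][j] + breaks[j] - breaks[i])
--             best[i][j] = q
--
--     return best[0][len(breaks) - 1]
-- ===== SOURCE B (Python) =====
-- def break_string(breaks, n):
--     p = [0] + sorted(breaks) + [n]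
--     memo = {}
--
--     def cost(i, j):
--         if j <= i + 1:
--             return 0
--         if (i, j) not in memo:
--             memo[(i, j)] = min(cost(i, k) + cost(k, j)
--                                for k in range(i + 1, j)) + p[j] - p[i]
--         return memo[(i, j)]
--
--     return cost(0, len(p) - 1)
-- ===== Notes on version B (the rewrite author's own statement) =====
-- stated objective: alternative
-- what changed: A's bottom-up triple loop filling a 2D table by increasing interval width is replaced by a top-down memoized recursion on (i, j) over a dict, with the common term p[j] - p[i] factored out of the inner min.
import Mathlib
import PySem

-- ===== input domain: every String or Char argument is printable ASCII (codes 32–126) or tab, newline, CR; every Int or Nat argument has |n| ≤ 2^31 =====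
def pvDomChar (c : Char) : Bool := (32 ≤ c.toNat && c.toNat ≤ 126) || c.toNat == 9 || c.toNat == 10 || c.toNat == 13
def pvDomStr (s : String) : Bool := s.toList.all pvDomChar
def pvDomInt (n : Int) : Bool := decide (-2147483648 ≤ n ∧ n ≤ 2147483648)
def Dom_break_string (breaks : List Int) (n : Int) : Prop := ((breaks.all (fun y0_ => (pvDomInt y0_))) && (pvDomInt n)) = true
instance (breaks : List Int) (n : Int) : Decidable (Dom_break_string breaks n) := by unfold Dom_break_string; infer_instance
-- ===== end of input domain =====

-- B replaces A's bottom-up triple loop over a 2D table by a top-down memoized recursion on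
-- (i, j) with the common term p[j] - p[i] factored out of the inner min (objective: alternative).

-- ===== PORT A =====
-- A's 2D list `best` (all entries 0-initialised, indices always in range) is modelled as an
-- index map (a one-field structure, so the evaluator materialises each written value once);
-- `best[i][j] = q` is the pointwise update pvTblSet.
structure PvTbl where
  get : Nat → Nat → Int

def pvTblSet (b : PvTbl) (i j : Nat) (v : Int) : PvTbl :=
  ⟨fun i' j' => if i' = i ∧ j' = j then v else b.get i' j'⟩

-- q = min(q, v) with q starting at math.inf: none plays inf (the loop is never empty when read).
def pvMinO (q : Option Int) (v : Int) : Option Int :=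
  match q with
  | none => some v
  | some x => some (min x v)

-- the body of `for k in range(i+1, j)` computing q, then `best[i][j] = q`
def pvInner (p : List Int) (width : Nat) (b : PvTbl) (i : Nat) : PvTbl :=
  let j := i + width
  let q := (List.range' (i + 1) (width - 1)).foldl
    (fun q k => pvMinO q (b.get i k + b.get k j + p.getD j 0 - p.getD i 0)) none
  pvTblSet b i j (q.getD 0)

-- the body of `for i in range(len(breaks) - width)`
def pvOuter (p : List Int) (m : Nat) (b : PvTbl) (width : Nat) : PvTbl :=
  (List.range (m - width)).foldl (pvInner p width) b

def break_string (breaks : List Int) (n : Int) : Int :=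
  let p : List Int := 0 :: (PySem.List.sorted breaks (fun x => x) ++ [n])
  let m := p.length
  let best := (List.range' 2 (m - 2)).foldl (pvOuter p m) ⟨fun _ _ => 0⟩
  best.get 0 (m - 1)

-- ===== PORT B =====
-- Source B's memoized recursion cost(i, j): the memo dict is threaded through explicitly;
-- fuel (any fuel ≥ j - i suffices; break_string_alt passes len(p)) makes the recursion structural.
def pvCostM (p : List Int) : Nat → Nat → Nat → PySem.Dict (Nat × Nat) Int → Int × PySem.Dict (Nat × Nat) Int
  | 0, _, _, memo => (0, memo)
  | f + 1, i, j, memo =>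
    if j ≤ i + 1 then (0, memo)
    else
      match memo.get? (i, j) with
      | some v => (v, memo)
      | none =>
        let st := (List.range' (i + 1) (j - i - 1)).foldl
          (fun (st : Option Int × PySem.Dict (Nat × Nat) Int) k =>
            (pvMinO st.1 ((pvCostM p f i k st.2).1 + (pvCostM p f k j (pvCostM p f i k st.2).2).1),
             (pvCostM p f k j (pvCostM p f i k st.2).2).2))
          (none, memo)
        let v := st.1.getD 0 + p.getD j 0 - p.getD i 0
        (v, st.2.insert (i, j) v)

def break_string_alt (breaks : List Int) (n : Int) : Int :=
  let p : List Int := 0 :: (PySem.List.sorted breaks (fun x => x) ++ [n])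
  (pvCostM p p.length 0 (p.length - 1) PySem.Dict.empty).1

-- ===== PRECONDITION & SPEC =====
def Spec_break_string (breaks : List Int) (n : Int) (out : Int) : Prop := out = break_string_alt breaks n
instance (breaks : List Int) (n : Int) (out : Int) : Decidable (Spec_break_string breaks n out) := by unfold Spec_break_string; infer_instance

-- ===== CLAIM (what is proved, stated in full; the proofs are below) =====
def Claim_equal_break_string : Prop := ∀ (breaks : List Int) (n : Int), Dom_break_string breaks n → Spec_break_string breaks n (break_string breaks n)

-- ===== LEMMAS AND PROOFS =====

-- the memo-free recursion underlying B (proof-side reference implementation)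
def pvMinNE (l : List Int) : Int :=
  match l with
  | [] => 0
  | x :: xs => xs.foldl min x

def pvCost (p : List Int) : Nat → Nat → Nat → Int
  | 0, _, _ => 0
  | f + 1, i, j =>
    if j ≤ i + 1 then 0
    else pvMinNE ((List.range' (i + 1) (j - i - 1)).map
           (fun k => pvCost p f i k + pvCost p f k j)) + p.getD j 0 - p.getD i 0


-- the canonical DP value: pvCost with exact fuel
def Cst (p : List Int) (i j : Nat) : Int := pvCost p (j - i) i j

lemma pvCost_succ_def (p : List Int) (f i j : Nat) :
    pvCost p (f + 1) i j = if j ≤ i + 1 then 0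
      else pvMinNE ((List.range' (i + 1) (j - i - 1)).map
             (fun k => pvCost p f i k + pvCost p f k j)) + p.getD j 0 - p.getD i 0 := rfl

lemma pvCost_succ (p : List Int) : ∀ (f i j : Nat), j - i ≤ f →
    pvCost p (f + 1) i j = pvCost p f i j := by
  intro f
  induction f with
  | zero =>
    intro i j h
    rw [pvCost_succ_def, if_pos (by omega)]
    rfl
  | succ f ih =>
    intro i j h
    by_cases hj : j ≤ i + 1
    · rw [pvCost_succ_def, if_pos hj, pvCost_succ_def, if_pos hj]
    · rw [pvCost_succ_def, if_neg hj]
      conv_rhs => rw [pvCost_succ_def, if_neg hj]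
      have hmap : (List.range' (i + 1) (j - i - 1)).map
            (fun k => pvCost p (f + 1) i k + pvCost p (f + 1) k j)
          = (List.range' (i + 1) (j - i - 1)).map
            (fun k => pvCost p f i k + pvCost p f k j) := by
        apply List.map_congr_left
        intro k hk
        rw [List.mem_range'_1] at hk
        rw [ih i k (by omega), ih k j (by omega)]
      rw [hmap]

lemma pvCost_of_le (p : List Int) (f i j : Nat) (h : j - i ≤ f) :
    pvCost p f i j = Cst p i j := by
  unfold Cst
  induction f with
  | zero =>
    have h0 : j - i = 0 := by omega
    rw [h0]
  | succ f ih =>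
    rcases Nat.lt_or_ge f (j - i) with hlt | hge
    · have : j - i = f + 1 := by omega
      rw [this]
    · rw [pvCost_succ p f i j hge, ih hge]

lemma Cst_low (p : List Int) (i j : Nat) (h : j ≤ i + 1) : Cst p i j = 0 := by
  unfold Cst
  have : j - i = 0 ∨ j - i = 1 := by omega
  rcases this with h0 | h1
  · rw [h0]; rfl
  · rw [h1]; simp only [pvCost]; rw [if_pos h]

lemma Cst_rec (p : List Int) (i j : Nat) (h : i + 1 < j) :
    Cst p i j = pvMinNE ((List.range' (i + 1) (j - i - 1)).map
        (fun k => Cst p i k + Cst p k j)) + p.getD j 0 - p.getD i 0 := by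
  conv_lhs => rw [Cst]
  have e1 : pvCost p (j - i) i j = pvCost p ((j - i - 1) + 1) i j := by
    congr 1; omega
  rw [e1, pvCost_succ_def, if_neg (by omega : ¬ j ≤ i + 1)]
  have hmap : (List.range' (i + 1) (j - i - 1)).map
        (fun k => pvCost p (j - i - 1) i k + pvCost p (j - i - 1) k j)
      = (List.range' (i + 1) (j - i - 1)).map (fun k => Cst p i k + Cst p k j) := by
    apply List.map_congr_left
    intro k hk
    rw [List.mem_range'_1] at hk
    rw [pvCost_of_le p _ i k (by omega), pvCost_of_le p _ k j (by omega)]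
  rw [hmap]

lemma foldl_pvMinO_some (l : List Int) : ∀ x : Int, l.foldl pvMinO (some x) = some (l.foldl min x) := by
  induction l with
  | nil => intro x; rfl
  | cons y ys ih => intro x; simp only [List.foldl, pvMinO]; exact ih _

lemma foldl_pvMinO_none (x : Int) (xs : List Int) :
    (x :: xs).foldl pvMinO none = some (xs.foldl min x) := by
  simp only [List.foldl, pvMinO]
  exact foldl_pvMinO_some xs x

lemma foldl_minO_map (F : Nat → Int) : ∀ (l : List Nat) (q : Option Int),
    l.foldl (fun q k => pvMinO q (F k)) q = (l.map F).foldl pvMinO q := by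
  intro l
  induction l with
  | nil => intro q; rfl
  | cons y ys ih => intro q; simp only [List.foldl, List.map]; exact ih _

lemma foldl_min_add (c : Int) : ∀ (l : List Int) (x : Int),
    (l.map (· + c)).foldl min (x + c) = l.foldl min x + c := by
  intro l
  induction l with
  | nil => intro x; rfl
  | cons y ys ih =>
    intro x
    simp only [List.map, List.foldl]
    rw [min_add_add_right, ih]

-- table invariant after all widths ≤ w have been processed
def TblInv (p : List Int) (m w : Nat) (b : PvTbl) : Prop :=
  ∀ i j, b.get i j = if i < j ∧ j < m ∧ j - i ≤ w then Cst p i j else 0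

-- table invariant inside the inner loop of width `width`: rows 0..i0-1 of that width done
def InvW (p : List Int) (m width i0 : Nat) (b : PvTbl) : Prop :=
  ∀ i j, b.get i j = if i < j ∧ j < m ∧ (j - i < width ∨ (j - i = width ∧ i < i0)) then Cst p i j else 0

lemma inner_step (p : List Int) (m width i0 : Nat) (b : PvTbl)
    (h2 : 2 ≤ width) (hi : i0 < m - width) (hb : InvW p m width i0 b) :
    InvW p m width (i0 + 1) (pvInner p width b i0) := by
  have hjm : i0 + width < m := by omega
  -- the value written is the canonical DP value
  have hq : pvInner p width b i0 = pvTblSet b i0 (i0 + width) (Cst p i0 (i0 + width)) := by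
    show pvTblSet b i0 (i0 + width)
        (((List.range' (i0 + 1) (width - 1)).foldl
          (fun q k => pvMinO q (b.get i0 k + b.get k (i0 + width) + p.getD (i0 + width) 0 - p.getD i0 0))
          none).getD 0)
      = pvTblSet b i0 (i0 + width) (Cst p i0 (i0 + width))
    congr 1
    -- rewrite the fold over the range as a fold over the mapped list
    rw [foldl_minO_map (fun k => b.get i0 k + b.get k (i0 + width)
          + p.getD (i0 + width) 0 - p.getD i0 0)]
    have hmap : (List.range' (i0 + 1) (width - 1)).map
          (fun k => b.get i0 k + b.get k (i0 + width) + p.getD (i0 + width) 0 - p.getD i0 0)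
        = ((List.range' (i0 + 1) (width - 1)).map
          (fun k => Cst p i0 k + Cst p k (i0 + width))).map
            (· + (p.getD (i0 + width) 0 - p.getD i0 0)) := by
      rw [List.map_map]
      apply List.map_congr_left
      intro k hk
      rw [List.mem_range'_1] at hk
      have hbik : b.get i0 k = Cst p i0 k := by
        rw [hb i0 k, if_pos ⟨by omega, by omega, Or.inl (by omega)⟩]
      have hbkj : b.get k (i0 + width) = Cst p k (i0 + width) := by
        rw [hb k (i0 + width), if_pos ⟨by omega, by omega, Or.inl (by omega)⟩]
      simp only [Function.comp_apply]
      rw [hbik, hbkj]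
      omega
    rw [hmap]
    have hw1 : width - 1 = (width - 2) + 1 := by omega
    rw [hw1, List.range'_succ, List.map_cons, List.map_cons, foldl_pvMinO_none,
        foldl_min_add, Option.getD_some]
    rw [Cst_rec p i0 (i0 + width) (by omega)]
    have : i0 + width - i0 - 1 = (width - 2) + 1 := by omega
    rw [this, List.range'_succ, List.map_cons]
    simp only [pvMinNE]
    omega
  rw [hq]
  intro i' j'
  show (if i' = i0 ∧ j' = i0 + width then Cst p i0 (i0 + width) else b.get i' j')
      = if i' < j' ∧ j' < m ∧ (j' - i' < width ∨ (j' - i' = width ∧ i' < i0 + 1)) then Cst p i' j' else 0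
  by_cases hij : i' = i0 ∧ j' = i0 + width
  · rw [if_pos hij]
    obtain ⟨hi', hj'⟩ := hij
    subst hi'; subst hj'
    rw [if_pos ⟨by omega, by omega, Or.inr ⟨by omega, by omega⟩⟩]
  · rw [if_neg hij, hb i' j']
    by_cases h1 : i' < j' ∧ j' < m ∧ (j' - i' < width ∨ (j' - i' = width ∧ i' < i0))
    · rw [if_pos h1, if_pos (by obtain ⟨a, c, d⟩ := h1; exact ⟨a, c, by omega⟩)]
    · have h2' : ¬(i' < j' ∧ j' < m ∧ (j' - i' < width ∨ (j' - i' = width ∧ i' < i0 + 1))) := by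
        intro ⟨a, c, d⟩
        apply h1
        refine ⟨a, c, ?_⟩
        rcases d with d | ⟨d1, d2⟩
        · exact Or.inl d
        · right
          refine ⟨d1, ?_⟩
          rcases Nat.lt_succ_iff_lt_or_eq.mp d2 with hlt | heq
          · exact hlt
          · exact absurd ⟨heq, by omega⟩ hij
      rw [if_neg h1, if_neg h2']

lemma inner_fold (p : List Int) (m width : Nat) (h2 : 2 ≤ width) :
    ∀ (cnt i0 : Nat) (b : PvTbl), i0 + cnt = m - width → InvW p m width i0 b →
      InvW p m width (m - width) ((List.range' i0 cnt).foldl (pvInner p width) b) := by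
  intro cnt
  induction cnt with
  | zero =>
    intro i0 b hsum hb
    simpa [← hsum] using hb
  | succ c ih =>
    intro i0 b hsum hb
    rw [List.range'_succ, List.foldl_cons]
    exact ih (i0 + 1) _ (by omega) (inner_step p m width i0 b h2 (by omega) hb)

lemma outer_step (p : List Int) (m width : Nat) (b : PvTbl)
    (h2 : 2 ≤ width) (hwm : width < m) (hb : TblInv p m (width - 1) b) :
    TblInv p m width (pvOuter p m b width) := by
  unfold pvOuter
  rw [List.range_eq_range']
  have h0 : InvW p m width 0 b := by
    intro i j
    rw [hb i j]
    by_cases h1 : i < j ∧ j < m ∧ j - i ≤ width - 1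
    · rw [if_pos h1, if_pos (by obtain ⟨a, c, d⟩ := h1; exact ⟨a, c, by omega⟩)]
    · rw [if_neg h1, if_neg (by intro ⟨a, c, d⟩; exact h1 ⟨a, c, by omega⟩)]
  have hend := inner_fold p m width h2 (m - width) 0 b (by omega) h0
  intro i j
  rw [hend i j]
  by_cases h1 : i < j ∧ j < m ∧ (j - i < width ∨ (j - i = width ∧ i < m - width))
  · rw [if_pos h1, if_pos (by obtain ⟨a, c, d⟩ := h1; exact ⟨a, c, by omega⟩)]
  · rw [if_neg h1, if_neg (by intro ⟨a, c, d⟩; exact h1 ⟨a, c, by omega⟩)]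

lemma outer_fold (p : List Int) (m : Nat) :
    ∀ (cnt w : Nat) (b : PvTbl), 1 ≤ w → w + cnt < m → TblInv p m w b →
      TblInv p m (w + cnt) ((List.range' (w + 1) cnt).foldl (pvOuter p m) b) := by
  intro cnt
  induction cnt with
  | zero => intro w b _ _ hb; simpa using hb
  | succ c ih =>
    intro w b hw hcnt hb
    rw [List.range'_succ, List.foldl_cons]
    have hstep : TblInv p m (w + 1) (pvOuter p m b (w + 1)) := by
      apply outer_step p m (w + 1) b (by omega) (by omega)
      simpa using hb
    have := ih (w + 1) _ (by omega) (by omega) hstep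
    have heq : w + 1 + c = w + (c + 1) := by omega
    rwa [heq] at this

-- ===== VERDICT (by name: the statement is the Claim_ definition above) =====
def MValid (p : List Int) (memo : PySem.Dict (Nat × Nat) Int) : Prop :=
  ∀ a b v, memo.get? (a, b) = some v → v = Cst p a b

lemma pvCostM_fold (p : List Int) (f i j : Nat)
    (IH : ∀ (i' j' : Nat) (memo : PySem.Dict (Nat × Nat) Int), j' - i' ≤ f → MValid p memo →
      (pvCostM p f i' j' memo).1 = Cst p i' j' ∧ MValid p (pvCostM p f i' j' memo).2) :
    ∀ (ks : List Nat) (acc : Option Int) (memo : PySem.Dict (Nat × Nat) Int),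
      MValid p memo → (∀ k ∈ ks, k - i ≤ f ∧ j - k ≤ f) →
      (ks.foldl
          (fun (st : Option Int × PySem.Dict (Nat × Nat) Int) k =>
            (pvMinO st.1 ((pvCostM p f i k st.2).1 + (pvCostM p f k j (pvCostM p f i k st.2).2).1),
             (pvCostM p f k j (pvCostM p f i k st.2).2).2))
          (acc, memo)).1
        = (ks.map (fun k => Cst p i k + Cst p k j)).foldl pvMinO acc
      ∧ MValid p ((ks.foldl
          (fun (st : Option Int × PySem.Dict (Nat × Nat) Int) k =>
            (pvMinO st.1 ((pvCostM p f i k st.2).1 + (pvCostM p f k j (pvCostM p f i k st.2).2).1),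
             (pvCostM p f k j (pvCostM p f i k st.2).2).2))
          (acc, memo)).2) := by
  intro ks
  induction ks with
  | nil => intro acc memo hmemo _; exact ⟨rfl, hmemo⟩
  | cons k ks ih =>
    intro acc memo hmemo hks
    have hk := hks k (List.mem_cons_self)
    have h1 := IH i k memo (by omega) hmemo
    have h2 := IH k j (pvCostM p f i k memo).2 (by omega) h1.2
    simp only [List.foldl_cons, List.map_cons, h1.1, h2.1]
    exact ih (pvMinO acc (Cst p i k + Cst p k j)) _ h2.2
      (fun k' hk' => hks k' (List.mem_cons_of_mem _ hk'))

lemma pvCostM_correct (p : List Int) : ∀ (f i j : Nat) (memo : PySem.Dict (Nat × Nat) Int),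
    j - i ≤ f → MValid p memo →
    (pvCostM p f i j memo).1 = Cst p i j ∧ MValid p (pvCostM p f i j memo).2 := by
  intro f
  induction f with
  | zero =>
    intro i j memo h hmemo
    exact ⟨(Cst_low p i j (by omega)).symm, hmemo⟩
  | succ f ihf =>
    intro i j memo h hmemo
    by_cases hj : j ≤ i + 1
    · simp only [pvCostM, if_pos hj]
      exact ⟨(Cst_low p i j hj).symm, hmemo⟩
    · simp only [pvCostM, if_neg hj]
      cases hget : memo.get? (i, j) with
      | some v =>
        simp only
        exact ⟨hmemo i j v hget, hmemo⟩
      | none =>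
        simp only
        have hfold := pvCostM_fold p f i j ihf (List.range' (i + 1) (j - i - 1)) none memo hmemo
          (by intro k hk; rw [List.mem_range'_1] at hk; omega)
        have hne : j - i - 1 = (j - i - 2) + 1 := by omega
        constructor
        · show (_ : Option Int × _).1.getD 0 + p.getD j 0 - p.getD i 0 = Cst p i j
          rw [hfold.1, hne, List.range'_succ, List.map_cons, foldl_pvMinO_none, Option.getD_some]
          rw [Cst_rec p i j (by omega), hne, List.range'_succ, List.map_cons]
          rfl
        · intro a b w hw
          rw [PySem.Dict.get?_insert] at hw
          by_cases hab : (a, b) = ((i, j) : Nat × Nat)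
          · rw [if_pos hab, Option.some_inj] at hw
            have ha : a = i := congrArg Prod.fst hab
            have hb : b = j := congrArg Prod.snd hab
            rw [ha, hb, ← hw]
            show (_ : Option Int × _).1.getD 0 + p.getD j 0 - p.getD i 0 = Cst p i j
            rw [hfold.1, hne, List.range'_succ, List.map_cons, foldl_pvMinO_none, Option.getD_some]
            rw [Cst_rec p i j (by omega), hne, List.range'_succ, List.map_cons]
            rfl
          · rw [if_neg hab] at hw
            exact hfold.2 a b w hw

lemma alt_main (p : List Int) (hm2 : 2 ≤ p.length) :
    (pvCostM p p.length 0 (p.length - 1) PySem.Dict.empty).1 = Cst p 0 (p.length - 1) := by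
  refine (pvCostM_correct p p.length 0 (p.length - 1) PySem.Dict.empty (by omega) ?_).1
  intro a b v hv
  rw [PySem.Dict.get?_empty] at hv
  simp at hv

lemma break_string_main (p : List Int) (hm2 : 2 ≤ p.length) :
    ((List.range' 2 (p.length - 2)).foldl (pvOuter p p.length) ⟨fun _ _ => 0⟩).get 0 (p.length - 1)
      = Cst p 0 (p.length - 1) := by
  have hinit : TblInv p p.length 1 ⟨fun _ _ => 0⟩ := by
    intro i j
    by_cases h1 : i < j ∧ j < p.length ∧ j - i ≤ 1
    · rw [if_pos h1, Cst_low p i j (by omega)]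
    · rw [if_neg h1]
  have hfold := outer_fold p p.length (p.length - 2) 1 ⟨fun _ _ => 0⟩ (by omega) (by omega) hinit
  have h1m : 1 + (p.length - 2) = p.length - 1 := by omega
  rw [h1m] at hfold
  have h12 : (1 : Nat) + 1 = 2 := rfl
  rw [h12] at hfold
  rw [hfold 0 (p.length - 1), if_pos ⟨by omega, by omega, by omega⟩]

-- ===== VERDICT (by name: the statement is the Claim_ definition above) =====
theorem break_string_spec : Claim_equal_break_string := by
  intro breaks n _
  unfold Spec_break_string break_string break_string_alt
  show ((List.range' 2 ((0 :: (PySem.List.sorted breaks (fun x => x) ++ [n])).length - 2)).foldl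
      (pvOuter (0 :: (PySem.List.sorted breaks (fun x => x) ++ [n]))
        ((0 :: (PySem.List.sorted breaks (fun x => x) ++ [n])).length)) ⟨fun _ _ => 0⟩).get 0
      ((0 :: (PySem.List.sorted breaks (fun x => x) ++ [n])).length - 1)
    = (pvCostM (0 :: (PySem.List.sorted breaks (fun x => x) ++ [n]))
        ((0 :: (PySem.List.sorted breaks (fun x => x) ++ [n])).length) 0
        ((0 :: (PySem.List.sorted breaks (fun x => x) ++ [n])).length - 1) PySem.Dict.empty).1
  have hm2 : 2 ≤ (0 :: (PySem.List.sorted breaks (fun x => x) ++ [n])).length := by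
    simp only [List.length_cons, List.length_append]
    omega
  rw [break_string_main _ hm2, alt_main _ hm2]
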